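-- pv_equiv track=rewrite | github.com/kolzchut/srm-etl | srm_tools/situations.py | situations_for_age_range
-- ===== SOURCE A (Python) =====
-- def situations_for_age_range(min_age, max_age):
--     ret = []
--     if min_age is None: min_age = 0
--     if max_age is None: max_age = 120
--
--     if min_age <= 54 and max_age >= 31:
--         ret.append('adults')
--     if min_age <= 30 and max_age >= 20:
--         ret.append('young_adults')
--     if min_age <= 19 and max_age >= 13:
--         ret.append('teens')
--     if min_age <= 1 and max_age >= 0:
--         ret.append('infants')
--     if min_age <= 12 and max_age >= 2:
--         ret.append('children')
--     if max_age >= 55: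
--         ret.append('seniors')
--     if len(ret) == 6:
--         ret = []
--     return ['human_situations:age_group:{}'.format(s) for s in ret]
-- ===== SOURCE B (Python) =====
-- # Age bands partition the age line at these boundaries:
-- # (<0) | infants 0-1 | children 2-12 | teens 13-19 | young_adults 20-30 | adults 31-54 | seniors 55+
-- BOUNDS = [0, 2, 13, 20, 31, 55]
--
-- # Output labels in A's output order, tagged with their 1-based age-band index.
-- LABELS = [('adults', 5), ('young_adults', 4), ('teens', 3),
--           ('infants', 1), ('children', 2), ('seniors', 6)]
--
-- def band(x):
--     """Index of the band containing age x: number of boundaries <= x (0 = below all bands)."""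
--     return sum(b <= x for b in BOUNDS)
--
-- def situations_for_age_range(min_age, max_age):
--     lo = band(0 if min_age is None else min_age)
--     hi = band(120 if max_age is None else max_age)
--     if lo <= 1 and hi >= 6:  # every band matched -> empty result
--         return []
--     return ['human_situations:age_group:' + name
--             for name, i in LABELS if lo <= i <= hi]
-- ===== Notes on version B (the rewrite author's own statement) =====
-- stated objective: alternative
-- what changed: Instead of six per-group interval-intersection checks, B classifies each endpoint into an age-band index (count of band boundaries <= it) and selects labels whose band index lies in the [lo,hi] index interval, with the all-bands case (lo<=1 and hi>=6) returning [].
import Mathlib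
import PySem

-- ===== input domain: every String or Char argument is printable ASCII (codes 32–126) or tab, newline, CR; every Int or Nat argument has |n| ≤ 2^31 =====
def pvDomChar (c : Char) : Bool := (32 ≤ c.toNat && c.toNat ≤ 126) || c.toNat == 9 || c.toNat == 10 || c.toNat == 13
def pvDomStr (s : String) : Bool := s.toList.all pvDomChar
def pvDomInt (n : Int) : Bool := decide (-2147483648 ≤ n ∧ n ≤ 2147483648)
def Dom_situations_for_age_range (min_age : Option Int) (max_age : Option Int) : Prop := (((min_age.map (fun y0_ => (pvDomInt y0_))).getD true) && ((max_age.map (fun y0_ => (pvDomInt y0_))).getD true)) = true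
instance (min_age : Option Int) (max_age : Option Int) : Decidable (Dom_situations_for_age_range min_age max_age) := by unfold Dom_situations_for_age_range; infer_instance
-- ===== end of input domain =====

-- B replaces A's six per-group interval-intersection checks by classifying each endpoint into an age-band index (count of boundaries <= it) and selecting labels by index-interval membership; objective: alternative.


-- ===== PORT A =====
def situations_for_age_range (min_age : Option Int) (max_age : Option Int) : List String :=
  let mn : Int := match min_age with | none => 0 | some v => v
  let mx : Int := match max_age with | none => 120 | some v => v
  let ret : List String := []
  let ret := if mn ≤ 54 ∧ mx ≥ 31 then ret ++ ["adults"] else ret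
  let ret := if mn ≤ 30 ∧ mx ≥ 20 then ret ++ ["young_adults"] else ret
  let ret := if mn ≤ 19 ∧ mx ≥ 13 then ret ++ ["teens"] else ret
  let ret := if mn ≤ 1 ∧ mx ≥ 0 then ret ++ ["infants"] else ret
  let ret := if mn ≤ 12 ∧ mx ≥ 2 then ret ++ ["children"] else ret
  let ret := if mx ≥ 55 then ret ++ ["seniors"] else ret
  let ret := if ret.length = 6 then [] else ret
  ret.map (fun s => "human_situations:age_group:" ++ s)

-- ===== PORT B =====
-- band boundaries of the age line (see Source B)
def pvBounds : List Int := [0, 2, 13, 20, 31, 55]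

-- output labels in A's output order, tagged with their 1-based age-band index
def pvLabels : List (String × Int) :=
  [("adults", 5), ("young_adults", 4), ("teens", 3), ("infants", 1), ("children", 2), ("seniors", 6)]

-- band x = sum(b <= x for b in BOUNDS)
def pvBand (x : Int) : Int :=
  pvBounds.foldl (fun acc b => acc + (if b ≤ x then 1 else 0)) 0

def situations_for_age_range_alt (min_age : Option Int) (max_age : Option Int) : List String :=
  let lo : Int := pvBand (match min_age with | none => 0 | some v => v)
  let hi : Int := pvBand (match max_age with | none => 120 | some v => v)
  if lo ≤ 1 ∧ hi ≥ 6 then []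
  else (pvLabels.filter (fun p => decide (lo ≤ p.2 ∧ p.2 ≤ hi))).map
    (fun p => "human_situations:age_group:" ++ p.1)

-- ===== PRECONDITION & SPEC =====
def Spec_situations_for_age_range (min_age : Option Int) (max_age : Option Int) (out : List String) : Prop := out = situations_for_age_range_alt min_age max_age
instance (min_age : Option Int) (max_age : Option Int) (out : List String) : Decidable (Spec_situations_for_age_range min_age max_age out) := by unfold Spec_situations_for_age_range; infer_instance

-- ===== CLAIM (what is proved, stated in full; the proofs are below) =====
def Claim_equal_situations_for_age_range : Prop := ∀ (min_age : Option Int) (max_age : Option Int), Dom_situations_for_age_range min_age max_age → Spec_situations_for_age_range min_age max_age (situations_for_age_range min_age max_age)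

-- ===== LEMMAS AND PROOFS =====

-- pvBand unfolded to an arithmetic expression omega can consume
theorem pvBand_eq (x : Int) :
    pvBand x = (if (0:Int) ≤ x then 1 else 0) + (if (2:Int) ≤ x then 1 else 0)
      + (if (13:Int) ≤ x then 1 else 0) + (if (20:Int) ≤ x then 1 else 0)
      + (if (31:Int) ≤ x then 1 else 0) + (if (55:Int) ≤ x then 1 else 0) := by
  simp [pvBand, pvBounds, List.foldl]

-- the thresholds of A's six conditions are exactly band-index comparisons
theorem band_le5 (x : Int) : (x ≤ 54) ↔ pvBand x ≤ 5 := by rw [pvBand_eq]; split_ifs <;> omega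
theorem band_le4 (x : Int) : (x ≤ 30) ↔ pvBand x ≤ 4 := by rw [pvBand_eq]; split_ifs <;> omega
theorem band_le3 (x : Int) : (x ≤ 19) ↔ pvBand x ≤ 3 := by rw [pvBand_eq]; split_ifs <;> omega
theorem band_le1 (x : Int) : (x ≤ 1) ↔ pvBand x ≤ 1 := by rw [pvBand_eq]; split_ifs <;> omega
theorem band_le2 (x : Int) : (x ≤ 12) ↔ pvBand x ≤ 2 := by rw [pvBand_eq]; split_ifs <;> omega
theorem band_ge5 (x : Int) : (31 ≤ x) ↔ 5 ≤ pvBand x := by rw [pvBand_eq]; split_ifs <;> omega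
theorem band_ge4 (x : Int) : (20 ≤ x) ↔ 4 ≤ pvBand x := by rw [pvBand_eq]; split_ifs <;> omega
theorem band_ge3 (x : Int) : (13 ≤ x) ↔ 3 ≤ pvBand x := by rw [pvBand_eq]; split_ifs <;> omega
theorem band_ge1 (x : Int) : (0 ≤ x) ↔ 1 ≤ pvBand x := by rw [pvBand_eq]; split_ifs <;> omega
theorem band_ge2 (x : Int) : (2 ≤ x) ↔ 2 ≤ pvBand x := by rw [pvBand_eq]; split_ifs <;> omega
theorem band_ge6 (x : Int) : (55 ≤ x) ↔ 6 ≤ pvBand x := by rw [pvBand_eq]; split_ifs <;> omega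
theorem band_nonneg (x : Int) : 0 ≤ pvBand x := by rw [pvBand_eq]; split_ifs <;> omega
theorem band_le6 (x : Int) : pvBand x ≤ 6 := by rw [pvBand_eq]; split_ifs <;> omega

-- core case: both ports as a function of the two band indices, then 7×7 case check
set_option maxHeartbeats 1000000 in
theorem pv_core (mn mx : Int) :
    situations_for_age_range (some mn) (some mx) = situations_for_age_range_alt (some mn) (some mx) := by
  have h0a := band_nonneg mn
  have h6a := band_le6 mn
  have h0b := band_nonneg mx
  have h6b := band_le6 mx
  simp only [situations_for_age_range, situations_for_age_range_alt, ge_iff_le,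
    band_le5 mn, band_le4 mn, band_le3 mn, band_le1 mn, band_le2 mn,
    band_ge5 mx, band_ge4 mx, band_ge3 mx, band_ge1 mx, band_ge2 mx, band_ge6 mx]
  generalize pvBand mn = a at *
  generalize pvBand mx = b at *
  interval_cases a <;> interval_cases b <;> rfl

-- ===== VERDICT (by name: the statement is the Claim_ definition above) =====
theorem situations_for_age_range_spec : Claim_equal_situations_for_age_range := by
  intro min_age max_age _
  unfold Spec_situations_for_age_range
  cases min_age <;> cases max_age <;> exact pv_core _ _
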